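-- pv_equiv track=rewrite | github.com/tnc0/Python-Calculator | Problems/Exams/exam8.py | VizeBasVeSonHarfiBuyut
-- ===== SOURCE A (Python) =====
-- def VizeBasVeSonHarfiBuyut(cumle):
--     def HarfIseBuyut(s):
--         if ord(s)>=ord('a') and ord(s)<=ord('z'):
--             return chr(ord(s)-ord('a')+ord('A'))
--         else:
--             return s
--     yeniCumle=''
--     for i in range(len(cumle)):
--         if (i==0) or (i==len(cumle)-1): # ilk veya son karakterse
--             yeniCumle+=HarfIseBuyut(cumle[i])
--         else:
--             if (cumle[i+1]==' ' or cumle[i-1]==' '): # kelime başı veya sonu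
--                 yeniCumle+=HarfIseBuyut(cumle[i])
--             else:
--                 yeniCumle+=cumle[i]
--
--     return yeniCumle
-- ===== SOURCE B (Python) =====
-- def VizeBasVeSonHarfiBuyut(cumle):
--     def HarfIseBuyut(s):
--         if ord(s) >= ord('a') and ord(s) <= ord('z'):
--             return chr(ord(s) - ord('a') + ord('A'))
--         else:
--             return s
--
--     def Duzelt(k):
--         if k == '':
--             return k
--         if len(k) == 1:
--             return HarfIseBuyut(k[0])
--         return HarfIseBuyut(k[0]) + k[1:-1] + HarfIseBuyut(k[-1])
--
--     return ' '.join(Duzelt(k) for k in cumle.split(' '))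
-- ===== Notes on version B (the rewrite author's own statement) =====
-- stated objective: simpler
-- what changed: Replaces the index loop with neighbor lookups (cumle[i-1]/cumle[i+1]) by a tokenize-transform-join decomposition: split on the single-space separator, uppercase first and last character of each token with the same ASCII helper, rejoin.
import Mathlib
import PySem

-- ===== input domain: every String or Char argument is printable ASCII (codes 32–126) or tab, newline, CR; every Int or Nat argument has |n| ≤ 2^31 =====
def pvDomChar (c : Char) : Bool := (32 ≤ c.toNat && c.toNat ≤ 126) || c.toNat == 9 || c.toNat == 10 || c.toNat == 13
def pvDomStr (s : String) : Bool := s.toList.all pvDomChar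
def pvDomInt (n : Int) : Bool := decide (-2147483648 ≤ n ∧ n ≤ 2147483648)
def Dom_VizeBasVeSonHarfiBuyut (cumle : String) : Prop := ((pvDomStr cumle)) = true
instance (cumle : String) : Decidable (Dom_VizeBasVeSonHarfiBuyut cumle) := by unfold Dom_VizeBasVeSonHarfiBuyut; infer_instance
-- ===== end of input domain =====

-- B replaces A's index loop with neighbor lookups by a split-on-' '/transform/join decomposition (simpler); return values proved equal.

-- ===== PORT A =====
-- shared helper HarfIseBuyut (identical nested def in both Python sources): ASCII a-z → A-Z
def pvHarf (s : Char) : Char :=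
  if s.toNat ≥ 'a'.toNat ∧ s.toNat ≤ 'z'.toNat then Char.ofNat (s.toNat - 'a'.toNat + 'A'.toNat) else s

-- literal port of A: for i in range(len(cumle)), string += modeled as List Char append, indices via pyGetD
-- (every index A uses is in range: 0 ≤ i ≤ len-1, and i±1 only when 0 < i < len-1)
def VizeBasVeSonHarfiBuyut (cumle : String) : String :=
  let cs := cumle.toList
  let n : Int := PySem.Str.len cumle
  String.ofList ((PySem.List.pyRange 0 n 1).foldl (fun yeni i =>
    if i = 0 ∨ i = n - 1 then yeni ++ [pvHarf (PySem.List.pyGetD cs i ' ')]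
    else if PySem.List.pyGetD cs (i+1) ' ' = ' ' ∨ PySem.List.pyGetD cs (i-1) ' ' = ' '
      then yeni ++ [pvHarf (PySem.List.pyGetD cs i ' ')]
      else yeni ++ [PySem.List.pyGetD cs i ' ']) [])

-- ===== PORT B =====
-- Duzelt(k): '' → ''; single char → upper; else upper(k[0]) + k[1:-1] + upper(k[-1])
def pvDuzelt (k : List Char) : List Char :=
  if k = [] then k
  else if k.length = 1 then [pvHarf (PySem.List.pyGetD k 0 ' ')]
  else [pvHarf (PySem.List.pyGetD k 0 ' ')] ++ PySem.List.slice k (some 1) (some (-1))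
         ++ [pvHarf (PySem.List.pyGetD k (-1) ' ')]

-- ' '.join(Duzelt(k) for k in cumle.split(' ')); split? never returns none since the separator is nonempty
def VizeBasVeSonHarfiBuyut_alt (cumle : String) : String :=
  String.ofList (PySem.Chars.join [' ']
    (((PySem.Chars.split? cumle.toList [' ']).getD []).map pvDuzelt))

-- ===== PRECONDITION & SPEC =====
def Spec_VizeBasVeSonHarfiBuyut (cumle : String) (out : String) : Prop := out = VizeBasVeSonHarfiBuyut_alt cumle
instance (cumle : String) (out : String) : Decidable (Spec_VizeBasVeSonHarfiBuyut cumle out) := by unfold Spec_VizeBasVeSonHarfiBuyut; infer_instance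

-- ===== CLAIM (what is proved, stated in full; the proofs are below) =====
def Claim_equal_VizeBasVeSonHarfiBuyut : Prop := ∀ (cumle : String), Dom_VizeBasVeSonHarfiBuyut cumle → Spec_VizeBasVeSonHarfiBuyut cumle (VizeBasVeSonHarfiBuyut cumle)

-- ===== LEMMAS AND PROOFS =====

-- structural model of cumle.split(' '): words separated by single spaces, empty tokens kept
def pvPrep (c : Char) : List (List Char) → List (List Char)
  | [] => [[c]]
  | p :: ps => (c :: p) :: ps

def pvWsplit : List Char → List (List Char)
  | [] => [[]]
  | c :: t => if c = ' ' then [] :: pvWsplit t else pvPrep c (pvWsplit t)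

def pvPrepw (w : List Char) : List (List Char) → List (List Char)
  | [] => [w]
  | p :: ps => (w ++ p) :: ps

-- structural model of A's per-character pass: b = "at start of string or previous char is a space"
def pvMapCtx : Bool → List Char → List Char
  | _, [] => []
  | b, c :: t => (if b = true ∨ t = [] ∨ t.head? = some ' ' then pvHarf c else c) :: pvMapCtx (c == ' ') t

-- k[1:-1] ++ [upper(k[-1])] as a structural recursion on the tail of a token
def pvTailFix : List Char → List Char
  | [] => []
  | [d] => [pvHarf d]
  | d :: p => d :: pvTailFix p

lemma pvHarf_space : pvHarf ' ' = ' ' := by decide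

lemma pvWsplit_ne_nil (l : List Char) : pvWsplit l ≠ [] := by
  cases l with
  | nil => simp [pvWsplit]
  | cons c t =>
    simp only [pvWsplit]
    split
    · simp
    · cases h : pvWsplit t <;> simp [pvPrep]

lemma pvGo_eq (l : List Char) : ∀ (fuel : Nat) (cur : List Char) (acc : List (List Char)),
    l.length ≤ fuel →
    PySem.Chars.splitOn.go [' '] fuel l cur acc = acc.reverse ++ pvPrepw cur.reverse (pvWsplit l) := by
  induction l with
  | nil =>
    intro fuel cur acc _
    cases fuel <;> simp [PySem.Chars.splitOn.go, pvWsplit, pvPrepw]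
  | cons c t ih =>
    intro fuel cur acc hf
    cases fuel with
    | zero => simp at hf
    | succ f =>
      rw [PySem.Chars.splitOn.go.eq_def]
      simp only []
      by_cases hc : c = ' '
      · subst hc
        have hpre : ([' '] : List Char).isPrefixOf (' ' :: t) = true := by simp [List.isPrefixOf]
        simp only [hpre, if_pos, List.length_cons, List.length_nil, List.drop_succ_cons, List.drop_zero]
        rw [ih f [] (cur.reverse :: acc) (by simpa using Nat.lt_succ_iff.mp (Nat.lt_of_lt_of_le (Nat.lt_succ_self _) (by simpa using hf)))]
        simp [pvWsplit, pvPrepw]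
        cases h : pvWsplit t with
        | nil => exact absurd h (pvWsplit_ne_nil t)
        | cons p ps => simp [pvPrepw]
      · have hpre : ([' '] : List Char).isPrefixOf (c :: t) = false := by
          simp [List.isPrefixOf]
          exact fun h => absurd h.symm hc
        simp only [hpre]
        rw [if_neg (by simp)]
        rw [ih f (c :: cur) acc (by simpa using Nat.succ_le_succ_iff.mp hf)]
        simp only [pvWsplit, if_neg hc, List.reverse_cons]
        cases h : pvWsplit t with
        | nil => exact absurd h (pvWsplit_ne_nil t)
        | cons p ps => simp [pvPrep, pvPrepw]

lemma pvSplitOn_eq (l : List Char) : PySem.Chars.splitOn l [' '] = pvWsplit l := by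
  rw [PySem.Chars.splitOn]
  rw [pvGo_eq l (l.length + 1) [] [] (Nat.le_succ _)]
  cases h : pvWsplit l with
  | nil => exact absurd h (pvWsplit_ne_nil l)
  | cons p ps => simp [pvPrepw]

lemma pvTailFix_eq (p : List Char) (h : p ≠ []) : pvTailFix p = p.dropLast ++ [pvHarf (p.getLast h)] := by
  induction p with
  | nil => simp at h
  | cons d q ih =>
    cases q with
    | nil => simp [pvTailFix]
    | cons e r =>
      rw [show pvTailFix (d :: e :: r) = d :: pvTailFix (e :: r) from rfl, ih (by simp)]
      simp [List.getLast]

lemma pvDuzelt_cons (c : Char) (p : List Char) : pvDuzelt (c :: p) = pvHarf c :: pvTailFix p := by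
  cases p with
  | nil => simp [pvDuzelt, pvTailFix, PySem.List.pyGetD]
  | cons d q =>
    rw [pvDuzelt]
    rw [if_neg (by simp), if_neg (by simp)]
    have hslice : PySem.List.slice (c::d::q) (some 1) (some (-1)) = (d::q).dropLast := by
      simp only [PySem.List.slice, Int.reduceNeg, Order.lt_one_iff, PySem.List.clampIdx_neg_ofNat, zero_le_one,
        PySem.List.clampIdx_of_nonneg, Int.toNat_one]
      simp [List.dropLast_eq_take]
    rw [hslice, PySem.List.pyGetD_neg_one _ _ (by simp)]
    rw [pvTailFix_eq (d::q) (by simp)]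
    simp [PySem.List.pyGetD, List.getLast]

lemma pvJoin_cons_head (a : Char) (w : List Char) (rest : List (List Char)) :
    PySem.Chars.join [' '] ((a :: w) :: rest) = a :: PySem.Chars.join [' '] (w :: rest) := by
  cases rest with
  | nil => simp [PySem.Chars.join_singleton]
  | cons y ys => simp [PySem.Chars.join_cons_cons]


-- T ∧ M: the per-character pass equals the tokenize/transform/join pipeline
lemma pvMain (t : List Char) :
    pvMapCtx true t = PySem.Chars.join [' '] ((pvWsplit t).map pvDuzelt) ∧
    (∀ (p : List Char) (ps : List (List Char)), pvWsplit t = p :: ps →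
      pvMapCtx false t = PySem.Chars.join [' '] (pvTailFix p :: ps.map pvDuzelt)) := by
  induction t with
  | nil =>
    refine ⟨by simp [pvMapCtx, pvWsplit, pvDuzelt, PySem.Chars.join_singleton], ?_⟩
    intro p ps h
    rw [pvWsplit] at h
    cases h
    simp [pvMapCtx, pvTailFix, PySem.Chars.join_singleton]
  | cons c t ih =>
    obtain ⟨q, qs, hw⟩ : ∃ q qs, pvWsplit t = q :: qs := by
      cases h : pvWsplit t with
      | nil => exact absurd h (pvWsplit_ne_nil t)
      | cons q qs => exact ⟨q, qs, rfl⟩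
    by_cases hc : c = ' '
    · subst hc
      have hcond : ∀ b : Bool, pvMapCtx b (' ' :: t) = ' ' :: pvMapCtx true t := by
        intro b
        rw [pvMapCtx]
        split_ifs <;> simp [pvHarf_space]
      constructor
      · rw [hcond true, pvWsplit, if_pos rfl, hw, List.map_cons, List.map_cons,
          PySem.Chars.join_cons_cons, ← List.map_cons, ← hw, ← ih.1]
        simp [pvDuzelt]
      · intro p ps h
        rw [pvWsplit, if_pos rfl] at h
        cases h
        rw [hcond false, hw, List.map_cons, pvTailFix, PySem.Chars.join_cons_cons,
          ← List.map_cons, ← hw, ← ih.1]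
        simp
    · have hfix : pvWsplit (c :: t) = (c :: q) :: qs := by
        rw [pvWsplit, if_neg hc, hw]; rfl
      constructor
      · have hl : pvMapCtx true (c :: t) = pvHarf c :: pvMapCtx false t := by
          rw [pvMapCtx, show (c == ' ') = false from by simp [hc]]; simp
        rw [hl, hfix, List.map_cons, pvDuzelt_cons, pvJoin_cons_head, ih.2 q qs hw]
      · intro p ps h
        rw [hfix] at h
        cases h
        cases t with
        | nil =>
          rw [pvWsplit] at hw
          cases hw
          simp [pvMapCtx, pvTailFix, PySem.Chars.join_singleton]
        | cons d t' =>
          by_cases hd : d = ' '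
          · subst hd
            have hl : pvMapCtx false (c :: ' ' :: t') = pvHarf c :: pvMapCtx false (' ' :: t') := by
              rw [pvMapCtx, show (c == ' ') = false from by simp [hc]]; simp
            rw [pvWsplit, if_pos rfl] at hw
            cases hw
            rw [hl, ih.2 [] (pvWsplit t') (by rw [pvWsplit, if_pos rfl])]
            rw [show pvTailFix [c] = [pvHarf c] from rfl,
              show ([pvHarf c] : List Char) = pvHarf c :: pvTailFix [] from rfl, pvJoin_cons_head]
          · obtain ⟨q', qs', hw'⟩ : ∃ q' qs', pvWsplit t' = q' :: qs' := by
              cases h : pvWsplit t' with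
              | nil => exact absurd h (pvWsplit_ne_nil t')
              | cons a b => exact ⟨a, b, rfl⟩
            have hl : pvMapCtx false (c :: d :: t') = c :: pvMapCtx false (d :: t') := by
              rw [pvMapCtx, show (c == ' ') = false from by simp [hc]]; simp [hd]
            have h2 : (d :: q') :: qs' = q :: qs := by
              rw [← hw, pvWsplit, if_neg hd, hw']; rfl
            obtain ⟨h3, h4⟩ := List.cons.inj h2
            subst h3; subst h4
            rw [hl, ih.2 (d :: q') qs' hw]
            rw [show pvTailFix (c :: d :: q') = c :: pvTailFix (d :: q') from rfl, pvJoin_cons_head]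

lemma pvGetMid (pre t : List Char) (c : Char) : PySem.List.pyGetD (pre ++ c :: t) (pre.length:Int) ' ' = c := by
  rw [PySem.List.pyGetD_natCast]
  simp [List.getD]

lemma pvGetNext (pre t : List Char) (c d : Char) :
    PySem.List.pyGetD (pre ++ c :: d :: t) ((pre.length:Int)+1) ' ' = d := by
  rw [show (pre.length:Int)+1 = ((pre.length+1 : Nat):Int) by push_cast; ring, PySem.List.pyGetD_natCast]
  simp [List.getD]

lemma pvGetPrev (pre t : List Char) (x : Char) (hx : pre.getLast? = some x) :
    PySem.List.pyGetD (pre ++ t) ((pre.length:Int)-1) ' ' = x := by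
  have hne : pre ≠ [] := by rintro rfl; simp at hx
  have hlen : 1 ≤ pre.length := Nat.one_le_iff_ne_zero.mpr (by simpa using hne)
  rw [show (pre.length:Int)-1 = ((pre.length-1 : Nat):Int) by omega, PySem.List.pyGetD_natCast]
  rw [List.getLast?_eq_getElem?] at hx
  rw [List.getD, List.getElem?_append_left (by omega), hx]
  rfl

-- A's fold over indices equals the structural pass, generalized over a processed prefix
lemma pvA_loop (s : List Char) : ∀ (l pre acc : List Char), s = pre ++ l →
    (PySem.List.pyRange (pre.length : Int) (s.length : Int) 1).foldl
      (fun yeni i =>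
        if i = 0 ∨ i = (s.length : Int) - 1 then yeni ++ [pvHarf (PySem.List.pyGetD s i ' ')]
        else if PySem.List.pyGetD s (i+1) ' ' = ' ' ∨ PySem.List.pyGetD s (i-1) ' ' = ' '
          then yeni ++ [pvHarf (PySem.List.pyGetD s i ' ')]
          else yeni ++ [PySem.List.pyGetD s i ' ']) acc
    = acc ++ pvMapCtx (pre == [] || pre.getLast? == some ' ') l := by
  intro l
  induction l with
  | nil =>
    intro pre acc h
    subst h
    rw [PySem.List.pyRange_one_eq_nil (by simp)]
    simp [pvMapCtx]
  | cons c t ih =>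
    intro pre acc h
    subst h
    have hlt : (pre.length : Int) < ((pre ++ c :: t).length : Int) := by
      simp [List.length_append]
    rw [PySem.List.pyRange_one_cons hlt]
    simp only [List.foldl_cons]
    have hr : PySem.List.pyRange ((pre.length:Int)+1) (((pre ++ c :: t).length : Nat) : Int) 1
        = PySem.List.pyRange ((((pre ++ [c]).length : Nat)) : Int) (((pre ++ c :: t).length : Nat) : Int) 1 := by
      norm_num
    rw [hr, ih (pre ++ [c]) _ (by simp)]
    rw [pvMapCtx]
    rw [show ((pre ++ [c]) == ([] : List Char) || (pre ++ [c]).getLast? == some ' ') = (c == ' ')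
      by simp]
    rw [pvGetMid pre t c]
    by_cases h0 : pre = []
    · subst h0
      simp
    · have h0' : ¬ ((pre.length:Int) = 0) := by
        simpa [List.length_eq_zero_iff] using h0
      by_cases h1 : t = []
      · subst h1
        rw [if_pos (by right; simp [List.length_append])]
        rw [if_pos (by right; left; rfl)]
        simp
      · obtain ⟨d, t', rfl⟩ : ∃ d t', t = d :: t' := by
          cases t with
          | nil => exact absurd rfl h1
          | cons d t' => exact ⟨d, t', rfl⟩
        rw [if_neg (by
          push_neg
          refine ⟨h0', ?_⟩
          simp only [List.length_append, List.length_cons]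
          push_cast
          omega)]
        obtain ⟨x, hx⟩ : ∃ x, pre.getLast? = some x := by
          cases hp : pre.getLast? with
          | none => exact absurd (List.getLast?_eq_none_iff.mp hp) h0
          | some x => exact ⟨x, rfl⟩
        rw [pvGetNext pre t' c d, pvGetPrev pre (c :: d :: t') x hx, hx]
        have hhead : ((d :: t').head? = some ' ') ↔ (d = ' ') := by simp
        by_cases hcond : d = ' ' ∨ x = ' '
        · rw [if_pos hcond, if_pos (by
            rcases hcond with h | h
            · right; right; simp [h]
            · left; simp [h])]
          simp
        · push_neg at hcond
          rw [if_neg (by tauto), if_neg (by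
            push_neg
            refine ⟨by simp [hcond.2, h0], by simp, by simp [hcond.1]⟩)]
          simp

-- ===== VERDICT (by name: the statement is the Claim_ definition above) =====
theorem VizeBasVeSonHarfiBuyut_spec : Claim_equal_VizeBasVeSonHarfiBuyut := by
  intro cumle _
  unfold Spec_VizeBasVeSonHarfiBuyut VizeBasVeSonHarfiBuyut VizeBasVeSonHarfiBuyut_alt
  have hA := pvA_loop cumle.toList cumle.toList [] [] (by simp)
  simp only [List.length_nil, Nat.cast_zero] at hA
  simp only [PySem.Str.len_eq, PySem.Chars.split?, List.isEmpty_cons, Option.getD_some, if_false,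
    Bool.false_eq_true, pvSplitOn_eq]
  exact congrArg String.ofList (hA.trans (by simp [(pvMain cumle.toList).1]))
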